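-- pv_equiv track=rewrite | github.com/aman2000jaiswal14/temptemp | app.py | encodeUser
-- ===== SOURCE A (Python) =====
-- range1 = (97, 122)
--
-- range2 = (65, 90)
--
-- range3 = (48, 57)
--
-- def encodeUser(user):
--     usermapper = {'@': '$', '$': '@', '&': '^', '^': '&', '#': '+', '+': '#', '*': '%', '%': '*'}
--     encode = ''
--     for i in user:
--         onebit = 0
--         twobit = 0
--         non = 0
--         val = i
--         if (range1[0] <= ord(i) <= range1[1]):
--             onebit = 0
--             if (range1[0] <= ord(i) <= range1[0] + 12):
--                 twobit = 0
--             else: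
--                 i = chr(range1[0] + range1[1] - ord(i))
--
--                 twobit = 1
--         elif (range2[0] <= ord(i) <= range2[1]):
--             onebit = 1
--             i = i.lower()
--             if (range1[0] <= ord(i) <= range1[0] + 12):
--                 twobit = 0
--             else:
--                 i = chr(range1[0] + range1[1] - ord(i))
--                 twobit = 1
--         elif (range3[0] <= ord(i) <= range3[1]):
--             onebit = 2
--             i = int(i)
--             i = 9 - i
--             i = str(i)
--         else:
--             non = 1
--             if (i in usermapper):
--                 i = usermapper[i]
--
--         if (non):
--             encode += i
--         else:
--             encode += (i + str(onebit) + str(twobit))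
--
--     return encode
-- ===== SOURCE B (Python) =====
-- # Precomputed encoding table: one dict lookup per character instead of a branch chain.
-- _table = {}
-- for _o in range(97, 123):  # lowercase
--     _table[chr(_o)] = chr(_o) + '00' if _o <= 109 else chr(97 + 122 - _o) + '01'
-- for _o in range(65, 91):   # uppercase: lowercase first
--     _l = _o + 32
--     _table[chr(_o)] = chr(_l) + '10' if _l <= 109 else chr(97 + 122 - _l) + '11'
-- for _o in range(48, 58):   # digits
--     _table[chr(_o)] = str(9 - (_o - 48)) + '20'
-- for _a, _b in [('@', '$'), ('$', '@'), ('&', '^'), ('^', '&'),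
--                ('#', '+'), ('+', '#'), ('*', '%'), ('%', '*')]:
--     _table[_a] = _b
--
-- def encodeUser(user):
--     return ''.join(_table.get(c, c) for c in user)
-- ===== Notes on version B (the rewrite author's own statement) =====
-- stated objective: faster
-- what changed: Replaced A's per-character if/elif branch chain (recomputing the mirror/lowercase/digit formulas and string concatenations for every character) by a module-level table built once mapping each encodable character to its full encoded string, so the function body is a single str.join with one dict lookup (defaulting to the character itself) per character.
import Mathlib
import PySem

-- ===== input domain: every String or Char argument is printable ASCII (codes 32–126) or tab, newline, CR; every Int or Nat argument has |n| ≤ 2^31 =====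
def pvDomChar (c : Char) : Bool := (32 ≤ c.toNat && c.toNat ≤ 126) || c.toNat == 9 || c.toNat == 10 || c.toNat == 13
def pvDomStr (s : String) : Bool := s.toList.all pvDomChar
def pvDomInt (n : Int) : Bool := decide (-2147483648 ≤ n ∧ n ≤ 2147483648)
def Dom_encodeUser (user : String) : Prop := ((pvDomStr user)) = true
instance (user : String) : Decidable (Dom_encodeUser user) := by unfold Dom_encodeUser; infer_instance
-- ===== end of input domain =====

-- B replaces A's per-character branch chain by a module-level precomputed table and a single
-- dict lookup per character (measured faster by a constant factor in a timing run).

-- ===== PORT A =====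
-- usermapper, defined at the top of A's body (constant, so hoisted as an A-side helper)
def pvUsermapper : PySem.Dict Char Char :=
  PySem.Dict.ofList [('@', '$'), ('$', '@'), ('&', '^'), ('^', '&'), ('#', '+'), ('+', '#'), ('*', '%'), ('%', '*')]

-- the body of A's 'for i in user' loop: the List Char appended to 'encode' for one character
def pvStepA (i : Char) : List Char :=
  -- onebit/twobit/non start at 0; each branch sets them as in A
  if 97 ≤ i.toNat ∧ i.toNat ≤ 122 then
    if 97 ≤ i.toNat ∧ i.toNat ≤ 97 + 12 then
      [i] ++ (PySem.Int.toStr 0).toList ++ (PySem.Int.toStr 0).toList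
    else
      let i := Char.ofNat (97 + 122 - i.toNat)
      [i] ++ (PySem.Int.toStr 0).toList ++ (PySem.Int.toStr 1).toList
  else if 65 ≤ i.toNat ∧ i.toNat ≤ 90 then
    let i := (PySem.Str.lower (String.ofList [i])).toList.headD i   -- i.lower() on a 1-char string
    if 97 ≤ i.toNat ∧ i.toNat ≤ 97 + 12 then
      [i] ++ (PySem.Int.toStr 1).toList ++ (PySem.Int.toStr 0).toList
    else
      let i := Char.ofNat (97 + 122 - i.toNat)
      [i] ++ (PySem.Int.toStr 1).toList ++ (PySem.Int.toStr 1).toList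
  else if 48 ≤ i.toNat ∧ i.toNat ≤ 57 then
    -- i = int(i); i = 9 - i; i = str(i)  (int() cannot fail here: i is a digit, so getD 0 is unreachable)
    let v : Int := (PySem.Int.ofStr? (String.ofList [i])).getD 0
    let v := 9 - v
    (PySem.Int.toStr v).toList ++ (PySem.Int.toStr 2).toList ++ (PySem.Int.toStr 0).toList
  else
    -- non = 1
    match PySem.Dict.get? pvUsermapper i with
    | some j => [j]
    | none => [i]

def encodeUser (user : String) : String :=
  String.ofList (user.toList.foldl (fun encode i => encode ++ pvStepA i) [])

-- ===== PORT B =====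
-- Source B's module-level table, built once by the same three range loops plus the symbol pairs
def pvTable : PySem.Dict Char String :=
  let t : PySem.Dict Char String := PySem.Dict.empty
  let t := (PySem.List.pyRange 97 123).foldl (fun t o =>
    t.insert (Char.ofNat o.toNat)
      (if o ≤ 109 then String.ofList [Char.ofNat o.toNat] ++ "00"
       else String.ofList [Char.ofNat (97 + 122 - o).toNat] ++ "01")) t
  let t := (PySem.List.pyRange 65 91).foldl (fun t o =>
    let l := o + 32
    t.insert (Char.ofNat o.toNat)
      (if l ≤ 109 then String.ofList [Char.ofNat l.toNat] ++ "10"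
       else String.ofList [Char.ofNat (97 + 122 - l).toNat] ++ "11")) t
  let t := (PySem.List.pyRange 48 58).foldl (fun t o =>
    t.insert (Char.ofNat o.toNat) (PySem.Int.toStr (9 - (o - 48)) ++ "20")) t
  ([('@', '$'), ('$', '@'), ('&', '^'), ('^', '&'), ('#', '+'), ('+', '#'), ('*', '%'), ('%', '*')] :
      List (Char × Char)).foldl (fun t p => t.insert p.1 (String.ofList [p.2])) t

def encodeUser_alt (user : String) : String :=
  String.ofList ((user.toList.map (fun c => (pvTable.getD c (String.ofList [c])).toList)).flatten)

-- ===== PRECONDITION & SPEC =====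
def Spec_encodeUser (user : String) (out : String) : Prop := out = encodeUser_alt user
instance (user : String) (out : String) : Decidable (Spec_encodeUser user out) := by unfold Spec_encodeUser; infer_instance

-- ===== CLAIM (what is proved, stated in full; the proofs are below) =====
def Claim_equal_encodeUser : Prop := ∀ (user : String), Dom_encodeUser user → Spec_encodeUser user (encodeUser user)

-- ===== LEMMAS AND PROOFS =====

-- per-character agreement, checked exhaustively over the (finite) domain characters
set_option maxRecDepth 16384 in
theorem pvStep_eq : ∀ n ∈ List.range 128,
    pvDomChar (Char.ofNat n) = true →
    pvStepA (Char.ofNat n) = (pvTable.getD (Char.ofNat n) (String.ofList [Char.ofNat n])).toList := by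
  decide

theorem pvStep_eq_char (c : Char) (h : pvDomChar c = true) :
    pvStepA c = (pvTable.getD c (String.ofList [c])).toList := by
  have hlt : c.toNat ∈ List.range 128 := by
    simp only [List.mem_range]
    simp only [pvDomChar, Bool.or_eq_true, Bool.and_eq_true, decide_eq_true_eq, beq_iff_eq] at h
    omega
  have := pvStep_eq c.toNat hlt
  rw [Char.ofNat_toNat] at this
  exact this h

set_option maxRecDepth 4096 in
theorem encodeUser_spec : Claim_equal_encodeUser := by
  intro user hdom
  unfold Spec_encodeUser encodeUser encodeUser_alt
  rw [PySem.List.foldl_append_eq_flatMap pvStepA user.toList []]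
  rw [List.flatten_eq_flatMap, List.flatMap_map]
  simp only [List.nil_append]
  congr 1
  apply List.flatMap_congr
  intro c hc
  apply pvStep_eq_char
  exact List.all_eq_true.mp hdom c hc
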